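-- pv_equiv track=rewrite | github.com/aaazjf/travel-map-agent | src/agent_core/context_manager.py | _fit_from_start
-- ===== SOURCE A (Python) =====
-- def estimate_tokens(text: str) -> int:
--   if not text:
--     return 0
--   # Lightweight approximation without external tokenizer dependency.
--   # Works reasonably for mixed Chinese/English product logs.
--   return max(1, (len(text) + 3) // 4)
--
-- def _fit_from_start(lines: list[str], budget_tokens: int) -> tuple[str, int, int]:
--   taken: list[str] = []
--   used_tokens = 0
--   count = 0
--   for line in lines:
--     add = estimate_tokens(line + "\n")
--     if used_tokens + add > budget_tokens:
--       break
--     taken.append(line)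
--     used_tokens += add
--     count += 1
--   text = "\n".join(taken)
--   return text, count, estimate_tokens(text)
-- ===== SOURCE B (Python) =====
-- from itertools import accumulate
--
-- def estimate_tokens(text: str) -> int:
--   if not text:
--     return 0
--   return max(1, (len(text) + 3) // 4)
--
-- def _fit_from_start(lines: list[str], budget_tokens: int) -> tuple[str, int, int]:
--   # Per-line costs, then running totals; since every cost >= 1 the totals are
--   # strictly increasing, so the number of totals <= budget equals the length of
--   # the longest affordable prefix.
--   cums = list(accumulate(estimate_tokens(line + "\n") for line in lines))
--   count = sum(1 for c in cums if c <= budget_tokens)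
--   text = "\n".join(lines[:count])
--   return text, count, estimate_tokens(text)
-- ===== Notes on version B (the rewrite author's own statement) =====
-- stated objective: alternative
-- what changed: Replaces the stateful loop-with-break by a data-flow pipeline: precompute per-line costs, form cumulative sums with itertools.accumulate, count how many running totals stay within budget (valid because each cost is >= 1, so the totals are strictly increasing), then slice and join.
import Mathlib
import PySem

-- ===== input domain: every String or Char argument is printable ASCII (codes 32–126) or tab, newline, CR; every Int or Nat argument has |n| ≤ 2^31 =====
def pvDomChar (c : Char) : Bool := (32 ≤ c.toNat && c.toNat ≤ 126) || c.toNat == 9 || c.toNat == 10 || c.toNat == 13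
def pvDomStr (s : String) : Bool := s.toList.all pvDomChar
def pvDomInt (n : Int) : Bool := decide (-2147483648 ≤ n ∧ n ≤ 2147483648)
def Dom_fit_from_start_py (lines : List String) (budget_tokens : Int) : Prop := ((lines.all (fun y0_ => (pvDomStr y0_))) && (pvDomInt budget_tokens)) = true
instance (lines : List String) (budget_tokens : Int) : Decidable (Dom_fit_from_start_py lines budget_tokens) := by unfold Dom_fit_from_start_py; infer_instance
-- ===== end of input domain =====

-- B replaces A's stateful loop-with-break by a pipeline: per-line costs, cumulative
-- sums, count of totals within budget (strictly increasing sums), slice and join.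

-- ===== PORT A =====
-- estimate_tokens (shared by both Pythons verbatim)
def pvEst (cs : List Char) : Int :=
  if cs.length = 0 then 0 else max 1 (PySem.Int.floordiv ((cs.length : Int) + 3) 4)

-- the 'for line in lines: … break' loop, state (used_tokens, count, taken)
def pvFitGo (budget : Int) : List String → Int → Int → List String → List String × Int
  | [], _, count, taken => (taken, count)
  | line :: rest, used, count, taken =>
    let add := pvEst (line.toList ++ ['\n'])
    if used + add > budget then (taken, count)
    else pvFitGo budget rest (used + add) (count + 1) (taken ++ [line])

def fit_from_start_py (lines : List String) (budget_tokens : Int) : String × Int × Int :=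
  let p := pvFitGo budget_tokens lines 0 0 []
  let text := PySem.Str.join "\n" p.1
  (text, p.2, pvEst text.toList)

-- ===== PORT B =====
-- itertools.accumulate
def pvAccum : List Int → Int → List Int
  | [], _ => []
  | c :: rest, acc => (acc + c) :: pvAccum rest (acc + c)

def fit_from_start_py_alt (lines : List String) (budget_tokens : Int) : String × Int × Int :=
  let cums := pvAccum (lines.map (fun line => pvEst (line.toList ++ ['\n']))) 0
  let count := cums.countP (fun c => decide (c ≤ budget_tokens))
  let text := PySem.Str.join "\n" (lines.take count)
  (text, (count : Int), pvEst text.toList)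

-- ===== PRECONDITION & SPEC =====
def Spec_fit_from_start_py (lines : List String) (budget_tokens : Int) (out : String × Int × Int) : Prop := out = fit_from_start_py_alt lines budget_tokens
instance (lines : List String) (budget_tokens : Int) (out : String × Int × Int) : Decidable (Spec_fit_from_start_py lines budget_tokens out) := by unfold Spec_fit_from_start_py; infer_instance

-- ===== CLAIM (what is proved, stated in full; the proofs are below) =====
def Claim_equal_fit_from_start_py : Prop := ∀ (lines : List String) (budget_tokens : Int), Dom_fit_from_start_py lines budget_tokens → Spec_fit_from_start_py lines budget_tokens (fit_from_start_py lines budget_tokens)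

-- ===== LEMMAS AND PROOFS =====

theorem pvEst_one_le (cs : List Char) (h : cs.length ≠ 0) : 1 ≤ pvEst cs := by
  simp [pvEst, h]

theorem pvAccum_lt (costs : List Int) (acc : Int)
    (h : ∀ c ∈ costs, 1 ≤ c) : ∀ x ∈ pvAccum costs acc, acc < x := by
  induction costs generalizing acc with
  | nil => simp [pvAccum]
  | cons c rest ih =>
    intro x hx
    simp only [pvAccum, List.mem_cons] at hx
    have hc : 1 ≤ c := h c (by simp)
    rcases hx with rfl | hx
    · omega
    · have := ih (acc + c) (fun d hd => h d (by simp [hd])) x hx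
      omega

theorem pvAccum_countP_zero (budget : Int) (costs : List Int) (acc : Int)
    (h : ∀ c ∈ costs, 1 ≤ c) (hb : budget < acc) :
    (pvAccum costs acc).countP (fun c => decide (c ≤ budget)) = 0 := by
  rw [List.countP_eq_zero]
  intro x hx
  have := pvAccum_lt costs acc h x hx
  simp only [decide_eq_true_eq]
  omega

theorem pvFitGo_eq (budget : Int) (lines : List String) :
    ∀ (used count : Int) (taken : List String),
    pvFitGo budget lines used count taken =
      (taken ++ lines.take ((pvAccum (lines.map (fun line => pvEst (line.toList ++ ['\n']))) used).countP (fun c => decide (c ≤ budget))),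
       count + ((pvAccum (lines.map (fun line => pvEst (line.toList ++ ['\n']))) used).countP (fun c => decide (c ≤ budget)) : Nat)) := by
  induction lines with
  | nil => intro used count taken; simp [pvFitGo, pvAccum]
  | cons line rest ih =>
    intro used count taken
    have hones : ∀ c ∈ rest.map (fun line => pvEst (line.toList ++ ['\n'])), 1 ≤ c := by
      intro c hc
      simp only [List.mem_map] at hc
      obtain ⟨l, _, rfl⟩ := hc
      exact pvEst_one_le _ (by simp)
    simp only [pvFitGo, List.map_cons, pvAccum]
    by_cases hgt : used + pvEst (line.toList ++ ['\n']) > budget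
    · rw [if_pos hgt]
      have h0 : (pvAccum (rest.map (fun line => pvEst (line.toList ++ ['\n']))) (used + pvEst (line.toList ++ ['\n']))).countP (fun c => decide (c ≤ budget)) = 0 :=
        pvAccum_countP_zero _ _ _ hones (by omega)
      rw [List.countP_cons]
      simp only [decide_eq_true_eq]
      rw [if_neg (by omega), h0]
      simp
    · rw [if_neg hgt]
      rw [ih (used + pvEst (line.toList ++ ['\n'])) (count + 1) (taken ++ [line])]
      rw [List.countP_cons]
      simp only [decide_eq_true_eq]
      rw [if_pos (by omega)]
      simp only [Prod.mk.injEq]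
      refine ⟨?_, ?_⟩
      · simp [List.take_succ_cons]
      · push_cast; ring

-- ===== VERDICT (by name: the statement is the Claim_ definition above) =====
theorem fit_from_start_py_spec : Claim_equal_fit_from_start_py := by
  intro lines budget _
  unfold Spec_fit_from_start_py fit_from_start_py fit_from_start_py_alt
  rw [pvFitGo_eq budget lines 0 0 []]
  simp
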